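-- pv_equiv track=rewrite | github.com/Zaubeerer/bitesofpy | 149/words.py | sort_words_case_insensitively
-- ===== SOURCE A (Python) =====
-- def sort_words_case_insensitively(words):
--     """Sort the provided word list ignoring case, and numbers last
--        (1995, 19ab = numbers / Happy, happy4you = strings, hence for
--         numbers you only need to check the first char of the word)
--     """
--     sorted_words = []
--
--     words_starting_with_digits = []
--
--     for word in words:
--         if not word[0].isdigit():
--             sorted_words.append(word)
--         else:
--             words_starting_with_digits.append(word)
--
--     sorted_words = sorted(sorted_words, key=str.lower)
--
--     for word in sorted(words_starting_with_digits):
--         sorted_words.append(word)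
--
--     return sorted_words
-- ===== SOURCE B (Python) =====
-- def sort_words_case_insensitively(words):
--     """Single stable sort with a composite key: non-digit-initial words first
--     (compared case-insensitively), digit-initial words last (compared raw)."""
--     return sorted(
--         words,
--         key=lambda w: (w[0].isdigit(), w if w[0].isdigit() else w.lower()),
--     )
-- ===== Notes on version B (the rewrite author's own statement) =====
-- stated objective: simpler
-- what changed: Replaced the partition-into-two-lists + two separate sorts + append loop with one stable sorted() call over a composite key (digit-group flag, lowercased word for the non-digit group / raw word for the digit group).
import Mathlib
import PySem

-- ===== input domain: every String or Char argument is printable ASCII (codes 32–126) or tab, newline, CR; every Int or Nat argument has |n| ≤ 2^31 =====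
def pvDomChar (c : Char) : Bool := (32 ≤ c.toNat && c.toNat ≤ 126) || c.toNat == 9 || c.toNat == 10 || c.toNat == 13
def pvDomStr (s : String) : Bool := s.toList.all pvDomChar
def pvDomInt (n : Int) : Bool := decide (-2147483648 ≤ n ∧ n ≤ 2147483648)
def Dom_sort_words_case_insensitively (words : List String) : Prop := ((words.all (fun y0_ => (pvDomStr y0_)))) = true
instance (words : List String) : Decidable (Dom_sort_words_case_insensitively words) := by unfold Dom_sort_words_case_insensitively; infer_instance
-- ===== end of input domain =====

-- B replaces A's partition + two sorts + append loop by one stable sort on a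
-- composite key (objective: simpler).

-- word[0].isdigit(); both Pythons evaluate it (Pre_ keeps words non-empty, so
-- the [] branch is never reached inside Pre_)
def pvFirstDigit (w : String) : Bool :=
  match w.toList with
  | [] => false
  | c :: _ => PySem.Chars.isdigit c

-- ===== PORT A =====
def sort_words_case_insensitively (words : List String) : List String :=
  -- the for-loop partitioning into (sorted_words, words_starting_with_digits)
  let p := words.foldl
    (fun (acc : List String × List String) word =>
      if !(pvFirstDigit word) then (acc.1 ++ [word], acc.2)
      else (acc.1, acc.2 ++ [word]))
    ([], [])
  -- sorted_words = sorted(sorted_words, key=str.lower)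
  let sorted_words := PySem.List.sorted p.1 (fun w => PySem.Str.lower w)
  -- for word in sorted(words_starting_with_digits): sorted_words.append(word)
  (PySem.List.sorted p.2 (fun w => w)).foldl (fun acc w => acc ++ [w]) sorted_words

-- ===== PORT B =====
def sort_words_case_insensitively_alt (words : List String) : List String :=
  PySem.List.sorted2 words
    (fun w => if pvFirstDigit w then (1 : Nat) else 0)
    (fun w => if pvFirstDigit w then w else PySem.Str.lower w)

-- ===== PRECONDITION & SPEC =====
-- Pre_ excludes lists containing an empty string: there word[0] raises
-- IndexError in A (and in B's key function alike).
def Pre_sort_words_case_insensitively (words : List String) : Prop :=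
  ∀ w ∈ words, w ≠ ""
instance (words : List String) : Decidable (Pre_sort_words_case_insensitively words) := by
  unfold Pre_sort_words_case_insensitively; infer_instance

def pvWitness_sort_words_case_insensitively : List String :=
  ["Happy", "happy4you", "1995", "19ab", "apple"]

def Spec_sort_words_case_insensitively (words : List String) (out : List String) : Prop :=
  out = sort_words_case_insensitively_alt words
instance (words : List String) (out : List String) :
    Decidable (Spec_sort_words_case_insensitively words out) := by
  unfold Spec_sort_words_case_insensitively; infer_instance

-- ===== CLAIM (what is proved, stated in full; the proofs are below) =====
def Claim_equal_sort_words_case_insensitively : Prop :=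
  ∀ (words : List String), Dom_sort_words_case_insensitively words →
    Pre_sort_words_case_insensitively words →
    Spec_sort_words_case_insensitively words (sort_words_case_insensitively words)

-- ===== LEMMAS AND PROOFS =====

-- abbreviations used only by the proofs
def pvK1 (w : String) : Nat := if pvFirstDigit w then 1 else 0
def pvK2 (w : String) : String := if pvFirstDigit w then w else PySem.Str.lower w
def pvLt2 (a b : String) : Bool :=
  decide (pvK1 a < pvK1 b) || (!decide (pvK1 b < pvK1 a) && decide (pvK2 a < pvK2 b))

theorem pv_insertBy_congr {α : Type} (b b' : α → α → Bool) (x : α) (l : List α)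
    (h : ∀ y ∈ l, b x y = b' x y) :
    PySem.List.insertBy b x l = PySem.List.insertBy b' x l := by
  induction l with
  | nil => rfl
  | cons z t ih =>
    simp only [PySem.List.insertBy]
    rw [h z (by simp)]
    by_cases hb : b' x z = true
    · simp [hb]
    · simp only [Bool.not_eq_true] at hb
      simp [hb, ih (fun y hy => h y (by simp [hy]))]

theorem pv_insertBy_append_left {α : Type} (b : α → α → Bool) (x : α) (l0 l1 : List α)
    (h : ∀ y ∈ l1, b x y = true) :
    PySem.List.insertBy b x (l0 ++ l1) = PySem.List.insertBy b x l0 ++ l1 := by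
  induction l0 with
  | nil =>
    cases l1 with
    | nil => rfl
    | cons y ys => simp [PySem.List.insertBy, h y (by simp)]
  | cons z t ih =>
    simp only [List.cons_append, PySem.List.insertBy]
    by_cases hb : b x z = true
    · simp [hb]
    · simp only [Bool.not_eq_true] at hb
      simp [hb, ih]

theorem pv_insertBy_append_right {α : Type} (b : α → α → Bool) (x : α) (l0 l1 : List α)
    (h : ∀ y ∈ l0, b x y = false) :
    PySem.List.insertBy b x (l0 ++ l1) = l0 ++ PySem.List.insertBy b x l1 := by
  induction l0 with
  | nil => rfl
  | cons z t ih =>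
    simp only [List.cons_append, PySem.List.insertBy]
    simp [h z (by simp), ih (fun y hy => h y (by simp [hy]))]

-- the heart: one lexicographic insertion sort = sort of the non-digit part ++ sort of the digit part
theorem pv_split_sort (xs : List String) :
    List.foldl (fun acc x => PySem.List.insertBy pvLt2 x acc) [] xs =
      PySem.List.sorted (xs.filter (fun w => !pvFirstDigit w)) (fun w => PySem.Str.lower w) ++
      PySem.List.sorted (xs.filter pvFirstDigit) (fun w => w) := by
  induction xs using List.reverseRecOn with
  | nil => rfl
  | append_singleton ys x ih =>
    rw [List.foldl_append, List.foldl_cons, List.foldl_nil, ih]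
    have hmem0 : ∀ y ∈ PySem.List.sorted (ys.filter (fun w => !pvFirstDigit w))
        (fun w => PySem.Str.lower w), pvFirstDigit y = false := by
      intro y hy
      have := (PySem.List.mem_sorted _ _ _ _).mp hy
      simpa using (List.of_mem_filter this)
    have hmem1 : ∀ y ∈ PySem.List.sorted (ys.filter pvFirstDigit) (fun w => w),
        pvFirstDigit y = true := by
      intro y hy
      have := (PySem.List.mem_sorted _ _ _ _).mp hy
      exact List.of_mem_filter this
    by_cases hx : pvFirstDigit x = true
    · -- x joins the digit group: passes over the whole non-digit block
      rw [pv_insertBy_append_right _ _ _ _ (by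
        intro y hy
        simp [pvLt2, pvK1, hx, hmem0 y hy])]
      rw [pv_insertBy_congr pvLt2 (fun a b => decide ((fun w => w) a < (fun w => w) b)) x _ (by
        intro y hy
        simp [pvLt2, pvK1, pvK2, hx, hmem1 y hy])]
      have h1 : List.filter pvFirstDigit (ys ++ [x]) = List.filter pvFirstDigit ys ++ [x] := by
        simp [hx]
      have h0 : List.filter (fun w => !pvFirstDigit w) (ys ++ [x]) =
          List.filter (fun w => !pvFirstDigit w) ys := by
        simp [hx]
      rw [h0, h1]
      rw [PySem.List.sorted_eq_foldl_insertBy (ys.filter pvFirstDigit ++ [x]),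
        List.foldl_append, List.foldl_cons, List.foldl_nil,
        ← PySem.List.sorted_eq_foldl_insertBy]
    · simp only [Bool.not_eq_true] at hx
      -- x joins the non-digit group: inserted before the whole digit block
      rw [pv_insertBy_append_left _ _ _ _ (by
        intro y hy
        simp [pvLt2, pvK1, hx, hmem1 y hy])]
      rw [pv_insertBy_congr pvLt2
          (fun a b => decide ((fun w => PySem.Str.lower w) a < (fun w => PySem.Str.lower w) b)) x _ (by
        intro y hy
        simp [pvLt2, pvK1, pvK2, hx, hmem0 y hy])]
      have h1 : List.filter pvFirstDigit (ys ++ [x]) = List.filter pvFirstDigit ys := by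
        simp [hx]
      have h0 : List.filter (fun w => !pvFirstDigit w) (ys ++ [x]) =
          List.filter (fun w => !pvFirstDigit w) ys ++ [x] := by
        simp [hx]
      rw [h0, h1]
      rw [PySem.List.sorted_eq_foldl_insertBy (ys.filter (fun w => !pvFirstDigit w) ++ [x]),
        List.foldl_append, List.foldl_cons, List.foldl_nil,
        ← PySem.List.sorted_eq_foldl_insertBy]

-- A's partition loop produces the two filters
theorem pv_partition_foldl (xs : List String) (a b : List String) :
    xs.foldl
      (fun (acc : List String × List String) word =>
        if !(pvFirstDigit word) then (acc.1 ++ [word], acc.2)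
        else (acc.1, acc.2 ++ [word]))
      (a, b) =
      (a ++ xs.filter (fun w => !pvFirstDigit w), b ++ xs.filter pvFirstDigit) := by
  induction xs generalizing a b with
  | nil => simp
  | cons x t ih =>
    rw [List.foldl_cons]
    by_cases hx : pvFirstDigit x = true
    · have hstep : (if (!pvFirstDigit x) = true then (a ++ [x], b) else (a, b ++ [x])) = (a, b ++ [x]) := by
        simp [hx]
      rw [hstep, ih, List.filter_cons, List.filter_cons]
      simp [hx]
    · simp only [Bool.not_eq_true] at hx
      have hstep : (if (!pvFirstDigit x) = true then (a ++ [x], b) else (a, b ++ [x])) = (a ++ [x], b) := by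
        simp [hx]
      rw [hstep, ih, List.filter_cons, List.filter_cons]
      simp [hx]

-- ===== VERDICT (by name: the statement is the Claim_ definition above) =====
theorem sort_words_case_insensitively_spec : Claim_equal_sort_words_case_insensitively := by
  intro words _ _
  unfold Spec_sort_words_case_insensitively
  unfold sort_words_case_insensitively sort_words_case_insensitively_alt
  rw [pv_partition_foldl words [] []]
  simp only [List.nil_append]
  rw [PySem.List.foldl_append_singleton_eq_self]
  exact (pv_split_sort words).symm
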